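-- pv_equiv track=rewrite | github.com/kalifg/aoc-2023 | 12/record.py | has_invalid_runs
-- ===== SOURCE A (Python) =====
-- def has_invalid_runs(visible_runs, damage_runs):
--     if not damage_runs and visible_runs:
--         return True
--
--     for d in sorted(set(visible_runs)):
--         if max(damage_runs) < d:
--             return True
--
--         if max(damage_runs) == d and visible_runs.count(d) > damage_runs.count(d):
--             return True
--
--     return False
-- ===== SOURCE B (Python) =====
-- def has_invalid_runs(visible_runs, damage_runs):
--     # Closed form: only the maximum visible run can violate the constraints.
--     if not visible_runs:
--         return False
--     if not damage_runs:
--         return True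
--     m = max(damage_runs)
--     vmax = max(visible_runs)
--     return vmax > m or (vmax == m and visible_runs.count(m) > damage_runs.count(m))
-- ===== Notes on version B (the rewrite author's own statement) =====
-- stated objective: faster
-- what changed: Replaces the loop over sorted(set(visible_runs)) with repeated max/count scans by a single closed-form comparison of max(visible_runs) against max(damage_runs), with one count comparison in the tie case.
import Mathlib
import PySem

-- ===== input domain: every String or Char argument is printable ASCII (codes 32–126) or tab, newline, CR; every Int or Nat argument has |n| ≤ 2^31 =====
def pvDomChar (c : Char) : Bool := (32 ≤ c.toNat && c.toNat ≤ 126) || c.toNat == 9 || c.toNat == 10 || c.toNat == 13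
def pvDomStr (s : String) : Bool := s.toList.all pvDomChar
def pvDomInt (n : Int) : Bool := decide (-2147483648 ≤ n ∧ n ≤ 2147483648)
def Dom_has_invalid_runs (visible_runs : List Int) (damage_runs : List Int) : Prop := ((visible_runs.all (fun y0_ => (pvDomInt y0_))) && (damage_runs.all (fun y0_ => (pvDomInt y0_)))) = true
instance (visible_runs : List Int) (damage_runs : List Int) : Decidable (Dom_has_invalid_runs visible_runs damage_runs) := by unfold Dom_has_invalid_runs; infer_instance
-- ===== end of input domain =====

-- B: closed-form comparison of max(visible_runs) vs max(damage_runs) instead of A's sorted(set(..)) scan (simpler; same values).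
-- ===== PORT A =====
-- the for-loop over sorted(set(visible_runs)) with early returns
def aLoop (visible_runs damage_runs : List Int) : List Int → Bool
  | [] => false
  | d :: rest =>
    match PySem.List.max? damage_runs (fun y => y) with
    | none => false   -- unreachable: the loop is only entered with damage_runs nonempty
    | some m =>
      if m < d then true
      else if m == d && PySem.List.count visible_runs d > PySem.List.count damage_runs d then true
      else aLoop visible_runs damage_runs rest

def has_invalid_runs (visible_runs : List Int) (damage_runs : List Int) : Bool :=
  if damage_runs.isEmpty && !visible_runs.isEmpty then true
  else aLoop visible_runs damage_runs
        (PySem.List.sorted (PySem.Set.ofList visible_runs) (fun x => x) false)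

-- ===== PORT B =====
def has_invalid_runs_alt (visible_runs : List Int) (damage_runs : List Int) : Bool :=
  match PySem.List.max? visible_runs (fun y => y) with
  | none => false
  | some vmax =>
    match PySem.List.max? damage_runs (fun y => y) with
    | none => true
    | some m =>
      vmax > m || (vmax == m && PySem.List.count visible_runs m > PySem.List.count damage_runs m)

-- ===== PRECONDITION & SPEC =====
def Spec_has_invalid_runs (visible_runs : List Int) (damage_runs : List Int) (out : Bool) : Prop := out = has_invalid_runs_alt visible_runs damage_runs
instance (visible_runs : List Int) (damage_runs : List Int) (out : Bool) : Decidable (Spec_has_invalid_runs visible_runs damage_runs out) := by unfold Spec_has_invalid_runs; infer_instance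

-- ===== CLAIM (what is proved, stated in full; the proofs are below) =====
def Claim_equal_has_invalid_runs : Prop := ∀ (visible_runs : List Int) (damage_runs : List Int), Dom_has_invalid_runs visible_runs damage_runs → Spec_has_invalid_runs visible_runs damage_runs (has_invalid_runs visible_runs damage_runs)

-- ===== LEMMAS AND PROOFS =====

-- ===== VERDICT (by name: the statement is the Claim_ definition above) =====
-- aLoop is an 'any' over its list
theorem aLoop_eq_any (v d : List Int) (m : Int) (hm : PySem.List.max? d (fun y => y) = some m)
    (L : List Int) :
    aLoop v d L = L.any (fun x => decide (m < x) ||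
      (m == x && PySem.List.count v x > PySem.List.count d x)) := by
  induction L with
  | nil => rfl
  | cons x rest ih =>
    simp only [aLoop, hm, List.any_cons, ih]
    by_cases h1 : m < x
    · simp [h1]
    · by_cases hmx : m = x
      · subst hmx
        simp
      · simp [h1, hmx]

theorem has_invalid_runs_spec : Claim_equal_has_invalid_runs := by
  intro v d _
  unfold Spec_has_invalid_runs has_invalid_runs has_invalid_runs_alt
  cases hv : PySem.List.max? v (fun y => y) with
  | none =>
    have hvnil : v = [] := (PySem.List.max?_eq_none_iff v _).mp hv
    subst hvnil
    simp only [List.isEmpty_nil, Bool.not_true, Bool.and_false, if_neg Bool.false_ne_true]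
    rfl
  | some vmax =>
    have hvne : v ≠ [] := by
      intro h; subst h; simpa using PySem.List.max?_mem hv
    cases hd : PySem.List.max? d (fun y => y) with
    | none =>
      have hdnil : d = [] := (PySem.List.max?_eq_none_iff d _).mp hd
      subst hdnil
      simp [hvne]
    | some m =>
      have hdne : d ≠ [] := by
        intro h; subst h; simpa using PySem.List.max?_mem hd
      have hne : d.isEmpty = false := by simpa using hdne
      rw [hne, aLoop_eq_any v d m hd]
      simp only [Bool.false_and, if_neg (Bool.false_ne_true)]
      have hmem : vmax ∈ v := PySem.List.max?_mem hv
      have hmax : ∀ y ∈ v, y ≤ vmax := by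
        intro y hy; exact PySem.List.max?_isMax hv y hy
      rw [Bool.eq_iff_iff]
      simp only [List.any_eq_true, PySem.List.mem_sorted, PySem.Set.mem_ofList,
        Bool.or_eq_true, Bool.and_eq_true, decide_eq_true_eq, beq_iff_eq, gt_iff_lt]
      constructor
      · rintro ⟨x, hx, hcase⟩
        rcases hcase with hlt | ⟨hxe, hc⟩
        · exact Or.inl (lt_of_lt_of_le hlt (hmax x hx))
        · subst hxe
          rcases lt_or_eq_of_le (hmax m hx) with h | h
          · exact Or.inl h
          · exact Or.inr ⟨h.symm ▸ rfl, hc⟩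
      · rintro (hlt | ⟨he, hc⟩)
        · exact ⟨vmax, hmem, Or.inl hlt⟩
        · exact ⟨vmax, hmem, Or.inr ⟨he.symm, he ▸ hc⟩⟩
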